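-- pv_equiv track=rewrite | github.com/tobysmith61/palmtree_etl | canonical/views.py | canonical_json_to_excel_style_table
-- ===== SOURCE A (Python) =====
-- def strip_empty_rows(table):
--     def row_has_data(row):
--         return any(
--             cell not in (None, "", [])
--             and str(cell).strip() != ""
--             for cell in row
--         )
--
--     return [row for row in table if row_has_data(row)]
--
-- def strip_empty_columns(table):
--     if not table:
--         return table
--
--     # transpose columns
--     cols = list(zip(*table))
--
--     def col_has_data(col):
--         return any(
--             cell not in (None, "", [])
--             and str(cell).strip()
--             for cell in col
--         )
--
--     # keep only columns with data
--     kept_cols = [col for col in cols if col_has_data(col)]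
--
--     # transpose back
--     return [list(row) for row in zip(*kept_cols)]
--
-- def canonical_json_to_excel_style_table(canonical_rows):
--     # Build canonical table (header + rows)
--     if canonical_rows:
--         canonical_header = list(canonical_rows[0].keys())
--
--         canonical_data = [canonical_header]
--         for row in canonical_rows:
--             canonical_data.append([row.get(h) for h in canonical_header])
--     else:
--         canonical_data = [["No mappings"], []]
--     canonical_data=strip_empty_columns(strip_empty_rows(canonical_data))
--     return canonical_data
-- ===== SOURCE B (Python) =====
-- def canonical_json_to_excel_style_table(canonical_rows):
--     # Works key-wise on the dicts: never materialises the full table and never transposes.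
--     if not canonical_rows:
--         return [["No mappings"]]
--
--     def has(cell):
--         return cell not in (None, "", []) and str(cell).strip() != ""
--
--     header = list(canonical_rows[0].keys())
--     keep_hdr = any(has(h) for h in header)
--     body = [r for r in canonical_rows if any(has(r.get(h)) for h in header)]
--     cols = [h for h in header
--             if (keep_hdr and has(h)) or any(has(r.get(h)) for r in body)]
--     out = [list(cols)] if keep_hdr else []
--     out += [[r.get(h) for h in cols] for r in body]
--     return out
-- ===== Notes on version B (the rewrite author's own statement) =====
-- stated objective: alternative
-- what changed: B never materialises the full table or transposes: it works key-wise on the dicts, filtering surviving data rows and kept header keys directly (column survival decided per header key), and emits the result by projecting each surviving dict onto the kept keys; the empty input is answered by the closed-form [['No mappings']].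
import Mathlib
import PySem

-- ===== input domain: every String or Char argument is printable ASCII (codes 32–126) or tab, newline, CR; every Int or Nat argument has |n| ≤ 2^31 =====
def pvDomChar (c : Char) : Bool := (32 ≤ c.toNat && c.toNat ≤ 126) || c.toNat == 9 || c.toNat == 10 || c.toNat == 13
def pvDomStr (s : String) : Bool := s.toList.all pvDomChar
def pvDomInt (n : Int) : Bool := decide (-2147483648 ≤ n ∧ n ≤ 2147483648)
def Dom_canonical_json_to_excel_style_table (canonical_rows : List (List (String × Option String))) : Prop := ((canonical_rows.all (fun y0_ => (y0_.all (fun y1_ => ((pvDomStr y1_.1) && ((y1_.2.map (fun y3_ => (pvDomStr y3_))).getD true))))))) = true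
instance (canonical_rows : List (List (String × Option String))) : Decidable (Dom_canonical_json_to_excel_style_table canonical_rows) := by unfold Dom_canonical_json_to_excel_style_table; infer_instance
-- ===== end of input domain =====

-- B never materialises the table or transposes: it filters surviving dicts and kept header
-- keys directly and projects each surviving dict onto the kept keys (objective: alternative).

-- ===== PORT A =====
-- cell not in (None, "", []) and str(cell).strip() != ""  (cells are None or str)
def pvRowCellA (cell : Option String) : Bool :=
  match cell with
  | none => false
  | some s => (s != "") && (PySem.Str.strip s != "")

def pvRowHasData (row : List (Option String)) : Bool := row.any pvRowCellA

def stripEmptyRows (table : List (List (Option String))) : List (List (Option String)) :=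
  table.filter pvRowHasData

-- cell not in (None, "", []) and str(cell).strip()  (truthy string ⇔ strip ≠ "")
def pvColCellA (cell : Option String) : Bool :=
  match cell with
  | none => false
  | some s => (s != "") && (PySem.Str.strip s != "")

def pvColHasData (col : List (Option String)) : Bool := col.any pvColCellA

-- zip(*table): take heads of all lists until some list is exhausted (structural on the first list)
def pvZipStarGo (l : List (Option String)) (ls : List (List (Option String))) :
    List (List (Option String)) :=
  match l with
  | [] => []
  | a :: l' =>
    if ls.any List.isEmpty then []
    else (a :: ls.map (fun r => r.headD none)) :: pvZipStarGo l' (ls.map List.tail)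

def pvZipStar (ls : List (List (Option String))) : List (List (Option String)) :=
  match ls with
  | [] => []
  | l :: rest => pvZipStarGo l rest

def stripEmptyColumns (table : List (List (Option String))) : List (List (Option String)) :=
  if table.isEmpty then table
  else
    let cols := pvZipStar table
    let kept_cols := cols.filter pvColHasData
    pvZipStar kept_cols         -- [list(row) for row in zip(*kept_cols)]; list() is the identity here

def canonical_json_to_excel_style_table (canonical_rows : List (List (String × Option String))) : List (List (Option String)) :=
  let canonical_data :=
    match canonical_rows with
    | [] => [[some "No mappings"], []]
    | r0 :: _ =>
      let header := PySem.Dict.keys (PySem.Dict.mk r0)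
      canonical_rows.foldl
        (fun acc row => acc ++ [header.map (fun h => PySem.Dict.getD (PySem.Dict.mk row) h none)])
        [header.map some]
  stripEmptyColumns (stripEmptyRows canonical_data)

-- ===== PORT B =====
def pvHasData (cell : Option String) : Bool :=
  match cell with
  | none => false
  | some s => (s != "") && (PySem.Str.strip s != "")

def pvHasS (s : String) : Bool := (s != "") && (PySem.Str.strip s != "")

def canonical_json_to_excel_style_table_alt (canonical_rows : List (List (String × Option String))) : List (List (Option String)) :=
  match canonical_rows with
  | [] => [[some "No mappings"]]
  | r0 :: _ =>
    let header := PySem.Dict.keys (PySem.Dict.mk r0)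
    let keep_hdr := header.any pvHasS
    let body := canonical_rows.filter
      (fun r => header.any (fun h => pvHasData (PySem.Dict.getD (PySem.Dict.mk r) h none)))
    let cols := header.filter
      (fun h => (keep_hdr && pvHasS h)
        || body.any (fun r => pvHasData (PySem.Dict.getD (PySem.Dict.mk r) h none)))
    (if keep_hdr then [cols.map some] else [])
      ++ body.map (fun r => cols.map (fun h => PySem.Dict.getD (PySem.Dict.mk r) h none))

-- ===== PRECONDITION & SPEC =====
def Spec_canonical_json_to_excel_style_table (canonical_rows : List (List (String × Option String))) (out : List (List (Option String))) : Prop := out = canonical_json_to_excel_style_table_alt canonical_rows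
instance (canonical_rows : List (List (String × Option String))) (out : List (List (Option String))) : Decidable (Spec_canonical_json_to_excel_style_table canonical_rows out) := by unfold Spec_canonical_json_to_excel_style_table; infer_instance

-- ===== CLAIM (what is proved, stated in full; the proofs are below) =====
def Claim_equal_canonical_json_to_excel_style_table : Prop := ∀ (canonical_rows : List (List (String × Option String))), Dom_canonical_json_to_excel_style_table canonical_rows → Spec_canonical_json_to_excel_style_table canonical_rows (canonical_json_to_excel_style_table canonical_rows)

-- ===== LEMMAS AND PROOFS =====

lemma pv_getD_tail (r : List (Option String)) (j : ℕ) :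
    r.tail.getD j none = r.getD (j + 1) none := by
  cases r <;> simp

-- zip(*ls) of a nonempty rectangular table is the list of columns, indexed by range n
lemma pv_zipStar_rect (n : ℕ) :
    ∀ (l : List (Option String)) (rest : List (List (Option String))),
      l.length = n → (∀ r ∈ rest, r.length = n) →
      pvZipStar (l :: rest) =
        (List.range n).map (fun j => (l :: rest).map (fun r => r.getD j none)) := by
  induction n with
  | zero =>
    intro l rest hl _
    rw [List.length_eq_zero_iff] at hl
    subst hl
    simp [pvZipStar, pvZipStarGo]
  | succ n ih =>
    intro l rest hl hrest
    match l with
    | a :: l' =>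
      have hany : rest.any List.isEmpty = false := by
        simp only [List.any_eq_false]
        intro r hr
        have := hrest r hr
        cases r with
        | nil => simp at this
        | cons x t => simp
      have hrec : pvZipStarGo l' (rest.map List.tail) = pvZipStar (l' :: rest.map List.tail) := rfl
      have hl' : l'.length = n := by simpa using hl
      have hrest' : ∀ r ∈ rest.map List.tail, r.length = n := by
        intro r hr
        simp only [List.mem_map] at hr
        obtain ⟨s, hs, rfl⟩ := hr
        have := hrest s hs
        simp [List.length_tail, this]
      have hih := ih l' (rest.map List.tail) hl' hrest'
      simp only [pvZipStar, pvZipStarGo, hany, if_neg, Bool.false_eq_true, not_false_iff]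
      rw [hrec, hih]
      rw [List.range_succ_eq_map]
      simp only [List.map_cons, List.map_map]
      congr 1
      · simp only [List.getD_cons_zero, List.cons.injEq, true_and]
        apply List.map_congr_left
        intro r hr
        cases r <;> simp
      · apply List.map_congr_left
        intro j hj
        simp only [Function.comp_def, List.getD_cons_succ]
        congr 1
        apply List.map_congr_left
        intro r hr
        exact pv_getD_tail r j

-- zip(*) of a list of columns built by projecting rows onto indices K transposes back to the rows
lemma pv_zipStar_cols (rs : List (List (Option String))) :
    ∀ (K : List ℕ), K ≠ [] →
      pvZipStar (K.map (fun j => rs.map (fun r => r.getD j none))) =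
        rs.map (fun r => K.map (fun j => r.getD j none)) := by
  induction rs with
  | nil =>
    intro K hK
    match K, hK with
    | k :: K', _ => simp [pvZipStar, pvZipStarGo]
  | cons r rs' ih =>
    intro K hK
    match K, hK with
    | k :: K', _ =>
      have hcols : (k :: K').map (fun j => (r :: rs').map (fun r => r.getD j none))
          = (r.getD k none :: rs'.map (fun r => r.getD k none))
            :: K'.map (fun j => r.getD j none :: rs'.map (fun r => r.getD j none)) := by
        simp
      rw [hcols]
      have hany : (K'.map (fun j => r.getD j none :: rs'.map (fun r => r.getD j none))).any
          List.isEmpty = false := by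
        simp only [List.any_eq_false]
        intro c hc
        simp only [List.mem_map] at hc
        obtain ⟨j, _, rfl⟩ := hc
        simp
      simp only [pvZipStar, pvZipStarGo, hany, if_neg, Bool.false_eq_true, not_false_iff,
        List.map_map, Function.comp_def, List.headD_cons, List.tail_cons]
      have hrec : pvZipStarGo (rs'.map (fun r => r.getD k none))
            (K'.map (fun j => rs'.map (fun r => r.getD j none)))
          = pvZipStar ((k :: K').map (fun j => rs'.map (fun r => r.getD j none))) := rfl
      rw [hrec, ih (k :: K') (by simp)]
      simp

lemma pv_foldl_append (l : List (List (String × Option String)))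
    (f : List (String × Option String) → List (Option String)) :
    ∀ init, l.foldl (fun acc row => acc ++ [f row]) init = init ++ l.map f := by
  induction l with
  | nil => intro init; simp
  | cons x xs ih => intro init; simp [ih]

-- A's column-cell predicate and B's are one and the same function
lemma pv_colCell_eq : pvColCellA = pvHasData := rfl

-- the heart: on a nonempty table whose rows all have the head row's length and all carry data,
-- A's column stripping projects every row onto the data-carrying column indices
lemma pv_colstrip (s0 : List (Option String)) (srest : List (List (Option String))) (n : ℕ)
    (hall : ∀ r ∈ s0 :: srest, r.length = n)
    (hdata : ∀ r ∈ s0 :: srest, r.any pvHasData = true) :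
    stripEmptyColumns (s0 :: srest) =
      (s0 :: srest).map (fun r =>
        (((List.range s0.length).filter
            (fun j => (s0 :: srest).any (fun r => pvHasData (r.getD j none)))).map
          (fun j => r.getD j none))) := by
  have hn : s0.length = n := hall s0 (by simp)
  have hrest : ∀ r ∈ srest, r.length = n := fun r hr => hall r (by simp [hr])
  set K := (List.range s0.length).filter
      (fun j => (s0 :: srest).any (fun r => pvHasData (r.getD j none))) with hKdef
  have hK : K ≠ [] := by
    have h0 := hdata s0 (by simp)
    rw [List.any_eq_true] at h0
    obtain ⟨c, hc, hcd⟩ := h0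
    obtain ⟨i, hi, rfl⟩ := List.getElem_of_mem hc
    have hmem : i ∈ K := by
      rw [hKdef]
      rw [List.mem_filter]
      refine ⟨List.mem_range.mpr hi, ?_⟩
      rw [List.any_eq_true]
      refine ⟨s0, by simp, ?_⟩
      rwa [List.getD_eq_getElem s0 none hi]
    exact List.ne_nil_of_mem hmem
  show (if (s0 :: srest).isEmpty then (s0 :: srest)
        else pvZipStar ((pvZipStar (s0 :: srest)).filter pvColHasData)) = _
  rw [if_neg (by simp)]
  rw [pv_zipStar_rect n s0 srest hn hrest]
  rw [List.filter_map]
  have hpred : (pvColHasData ∘ fun j => (s0 :: srest).map (fun r => r.getD j none))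
      = fun j => (s0 :: srest).any (fun r => pvHasData (r.getD j none)) := by
    funext j
    simp [pvColHasData, Function.comp_def, List.any_map, pv_colCell_eq]
  rw [hpred]
  rw [← hn, ← hKdef]
  exact pv_zipStar_cols (s0 :: srest) K hK

-- projecting range-indices filtered through a predicate on the entries equals filter-then-map
lemma pv_range_filter_map {α β : Type} (p : α → Bool) (g : α → β) (d : α) :
    ∀ l : List α,
      ((List.range l.length).filter (fun j => p (l.getD j d))).map (fun j => g (l.getD j d))
        = (l.filter p).map g := by
  intro l
  induction l with
  | nil => simp
  | cons a l ih =>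
    rw [List.length_cons, List.range_succ_eq_map, List.filter_cons]
    have hmf : (List.filter (fun j => p ((a :: l).getD j d)) ((List.range l.length).map Nat.succ))
        = ((List.range l.length).filter (fun j => p (l.getD j d))).map Nat.succ := by
      rw [List.filter_map]
      congr 1
    by_cases hp : p a = true
    · simp only [List.getD_cons_zero, hp, if_pos, List.map_cons, hmf, List.map_map,
        Function.comp_def, List.getD_cons_succ, List.filter_cons_of_pos hp]
      rw [ih]
    · rw [List.filter_cons_of_neg (by simp [hp])]
      simp only [List.getD_cons_zero, hp, Bool.false_eq_true, if_neg, not_false_iff, hmf,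
        List.map_map, Function.comp_def, List.getD_cons_succ]
      exact ih

lemma pv_getD_map_lt {α : Type} (f : α → Option String) (d : α) (l : List α) (j : ℕ)
    (hj : j < l.length) : (l.map f).getD j none = f (l.getD j d) := by
  rw [List.getD_eq_getElem _ _ (by simpa using hj), List.getD_eq_getElem _ _ hj]
  simp

-- ===== VERDICT (by name: the statement is the Claim_ definition above) =====
theorem canonical_json_to_excel_style_table_spec : Claim_equal_canonical_json_to_excel_style_table := by
  intro canonical_rows _
  show canonical_json_to_excel_style_table canonical_rows
      = canonical_json_to_excel_style_table_alt canonical_rows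
  match canonical_rows with
  | [] => decide
  | r0 :: rest =>
    unfold canonical_json_to_excel_style_table canonical_json_to_excel_style_table_alt
    simp only
    rw [pv_foldl_append]
    simp only [List.singleton_append]
    unfold stripEmptyRows
    set header := PySem.Dict.keys (PySem.Dict.mk r0) with hh
    set hd := header.map some with hhd
    set valRow : List (String × Option String) → List (Option String) :=
      fun row => header.map (fun h => PySem.Dict.getD (PySem.Dict.mk row) h none) with hvr
    set q : List (String × Option String) → Bool :=
      fun r => header.any (fun h => pvHasData (PySem.Dict.getD (PySem.Dict.mk r) h none)) with hq
    set keep := header.any pvHasS with hkeep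
    set body := (r0 :: rest).filter q with hbody
    set P : String → Bool :=
      fun h => (keep && pvHasS h)
        || body.any (fun r => pvHasData (PySem.Dict.getD (PySem.Dict.mk r) h none)) with hP
    set cols := header.filter P with hcols
    have hfa : pvRowHasData = fun (r : List (Option String)) => r.any pvHasData := rfl
    have hhd_any : pvRowHasData hd = keep := by
      simp only [hfa, hhd, hkeep, List.any_map]
      rfl
    have hS : (hd :: (r0 :: rest).map valRow).filter pvRowHasData
        = (if keep then [hd] else []) ++ body.map valRow := by
      rw [List.filter_cons, hhd_any]
      have h2 : ((r0 :: rest).map valRow).filter pvRowHasData = body.map valRow := by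
        rw [List.filter_map, hbody]
        congr 1
        apply List.filter_congr
        intro r _
        simp [Function.comp_def, hfa, hvr, hq, List.any_map]
      rw [h2]
      by_cases hk : keep = true
      · simp [hk]
      · simp [hk]
    rw [hS]
    cases hSc : (if keep then [hd] else []) ++ body.map valRow with
    | nil =>
      rcases List.append_eq_nil_iff.mp hSc with ⟨h1, h2⟩
      have hk : keep = false := by
        by_cases k : keep = true
        · rw [k] at h1; simp at h1
        · simpa using k
      have hb : body = [] := List.map_eq_nil_iff.mp h2
      rw [hk, hb]
      simp [stripEmptyColumns]
    | cons s0 srest =>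
      have hfs : (hd :: (r0 :: rest).map valRow).filter pvRowHasData = s0 :: srest :=
        hS.trans hSc
      have hmem : ∀ r ∈ s0 :: srest, r ∈ (if keep then [hd] else []) ++ body.map valRow := by
        intro r hr; rw [hSc]; exact hr
      have hlen : ∀ r ∈ s0 :: srest, r.length = header.length := by
        intro r hr
        rcases List.mem_append.mp (hmem r hr) with h | h
        · have : r = hd := by
            by_cases k : keep = true
            · rw [k] at h; simpa using h
            · simp [k] at h
          rw [this, hhd]; simp
        · obtain ⟨row, _, rfl⟩ := List.mem_map.mp h
          rw [hvr]; simp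
      have hdat : ∀ r ∈ s0 :: srest, r.any pvHasData = true := by
        intro r hr
        rw [← hfs] at hr
        have := List.of_mem_filter hr
        rw [hfa] at this
        exact this
      rw [pv_colstrip s0 srest header.length hlen hdat]
      have hs0len : s0.length = header.length := hlen s0 (by simp)
      have hanyj : ∀ j < header.length,
          ((s0 :: srest).any (fun r => pvHasData (r.getD j none))) = P (header.getD j "") := by
        intro j hj
        rw [← hSc, List.any_append, List.any_map, hP]
        have hL : ((if keep then [hd] else []).any (fun r => pvHasData (r.getD j none)))
            = (keep && pvHasS (header.getD j "")) := by
          by_cases k : keep = true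
          · rw [k]
            simp only [if_pos, List.any_cons, List.any_nil, Bool.or_false, Bool.true_and]
            rw [hhd, pv_getD_map_lt some "" header j hj]
            rfl
          · simp [k]
        have hR : (fun r => pvHasData ((valRow r).getD j none))
            = (fun r => pvHasData (PySem.Dict.getD (PySem.Dict.mk r) (header.getD j "") none)) := by
          funext r
          rw [hvr, pv_getD_map_lt _ "" header j hj]
        rw [hL]
        simp only [Function.comp_def]
        rw [hR]
      have hK : (List.range s0.length).filter
            (fun j => (s0 :: srest).any (fun r => pvHasData (r.getD j none)))
          = (List.range header.length).filter (fun j => P (header.getD j "")) := by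
        rw [hs0len]
        apply List.filter_congr
        intro j hj
        exact hanyj j (List.mem_range.mp hj)
      rw [hK]
      have hproj : ∀ (f : String → Option String),
          ((List.range header.length).filter (fun j => P (header.getD j ""))).map
              (fun j => (header.map f).getD j none)
            = cols.map f := by
        intro f
        rw [List.map_congr_left (g := fun j => f (header.getD j "")) (fun j hj => by
          have hjlt : j < header.length := List.mem_range.mp (List.mem_filter.mp hj).1
          exact pv_getD_map_lt f "" header j hjlt)]
        rw [pv_range_filter_map P f "" header, hcols]
      rw [← hSc, List.map_append, List.map_map]
      congr 1
      · by_cases k : keep = true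
        · simp only [k, if_pos, List.map_cons, List.map_nil]
          rw [hhd, hproj some]
        · simp [k]
      · apply List.map_congr_left
        intro r _
        simp only [Function.comp_def]
        rw [hvr, hproj (fun h => PySem.Dict.getD (PySem.Dict.mk r) h none)]
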